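-- pv_equiv track=rewrite | github.com/micklethepickle/action-conditioned-world-models | src/misc/helper_methods.py | construct_jobs
-- ===== SOURCE A (Python) =====
-- import itertools
--
-- def construct_jobs(grid):
--     jobs = []
--     individual_options = [
--         [{key: value} for value in values] for key, values in grid.items()
--     ]
--     product_options = list(itertools.product(*individual_options))
--     jobs += [
--         {k: v for d in option_set for k, v in d.items()}
--         for option_set in product_options
--     ]
--     return jobs
-- ===== SOURCE B (Python) =====
-- def construct_jobs(grid):
--     jobs = [{}]
--     for key, values in grid.items():
--         jobs = [{**partial, key: value} for partial in jobs for value in values]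
--     return jobs
-- ===== Notes on version B (the rewrite author's own statement) =====
-- stated objective: simpler
-- what changed: Replaces the build-singleton-dicts / itertools.product / merge-each-tuple pipeline with a single fold over grid.items() that extends every partial assignment dict by one key at a time.
import Mathlib
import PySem

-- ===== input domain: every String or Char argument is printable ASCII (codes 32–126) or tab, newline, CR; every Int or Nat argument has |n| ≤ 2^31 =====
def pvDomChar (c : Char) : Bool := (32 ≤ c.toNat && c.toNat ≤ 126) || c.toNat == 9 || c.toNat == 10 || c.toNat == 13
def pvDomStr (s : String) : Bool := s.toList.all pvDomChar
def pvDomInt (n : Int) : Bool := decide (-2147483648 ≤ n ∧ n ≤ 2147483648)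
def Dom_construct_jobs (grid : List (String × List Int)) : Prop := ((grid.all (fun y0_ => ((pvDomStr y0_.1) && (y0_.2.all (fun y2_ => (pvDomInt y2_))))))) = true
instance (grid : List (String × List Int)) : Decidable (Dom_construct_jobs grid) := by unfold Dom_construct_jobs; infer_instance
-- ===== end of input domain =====

-- B replaces the singleton-dicts / itertools.product / merge pipeline by one fold extending
-- partial dicts key by key (objective: simpler). Return values proved equal on all inputs.

-- ===== PORT A =====
-- Python dict insertion: overwrite in place if the key exists, else append (shared helper of both ports).
def pvDictIns (d : List (String × Int)) (k : String) (v : Int) : List (String × Int) :=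
  if d.any (fun kv => kv.1 == k) then d.map (fun kv => if kv.1 == k then (k, v) else kv)
  else d ++ [(k, v)]

-- itertools.product over a list of lists: first factor varies slowest, exactly Python's order.
def pvProduct : List (List (List (String × Int))) → List (List (List (String × Int)))
  | [] => [[]]
  | l :: ls => l.flatMap (fun x => (pvProduct ls).map (fun t => x :: t))

def construct_jobs (grid : List (String × List Int)) : List (List (String × Int)) :=
  let individual_options := grid.map (fun kv => kv.2.map (fun v => [(kv.1, v)]))
  let product_options := pvProduct individual_options
  -- {k: v for d in option_set for k, v in d.items()}
  product_options.map (fun option_set =>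
    option_set.foldl (fun acc d => d.foldl (fun a kv => pvDictIns a kv.1 kv.2) acc) [])

-- ===== PORT B =====
def construct_jobs_alt (grid : List (String × List Int)) : List (List (String × Int)) :=
  grid.foldl
    (fun jobs kv => jobs.flatMap (fun partial_ => kv.2.map (fun v => pvDictIns partial_ kv.1 v)))
    [[]]

-- ===== PRECONDITION & SPEC =====
def Spec_construct_jobs (grid : List (String × List Int)) (out : List (List (String × Int))) : Prop := out = construct_jobs_alt grid
instance (grid : List (String × List Int)) (out : List (List (String × Int))) : Decidable (Spec_construct_jobs grid out) := by unfold Spec_construct_jobs; infer_instance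

-- ===== CLAIM (what is proved, stated in full; the proofs are below) =====
def Claim_equal_construct_jobs : Prop := ∀ (grid : List (String × List Int)), Dom_construct_jobs grid → Spec_construct_jobs grid (construct_jobs grid)

-- ===== LEMMAS AND PROOFS =====

-- merging the tail of an option set, continuing from an accumulator dict
def pvMergeInto (p : List (String × Int)) (os : List (List (String × Int))) : List (String × Int) :=
  os.foldl (fun acc d => d.foldl (fun a kv => pvDictIns a kv.1 kv.2) acc) p

-- the B fold, started from any job list, appends to each job every merged option set of the rest
theorem construct_jobs_alt_invariant (grid : List (String × List Int))
    (jobs : List (List (String × Int))) :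
    grid.foldl
      (fun jobs kv => jobs.flatMap (fun partial_ => kv.2.map (fun v => pvDictIns partial_ kv.1 v)))
      jobs
    = jobs.flatMap (fun p =>
        (pvProduct (grid.map (fun kv => kv.2.map (fun v => [(kv.1, v)])))).map (pvMergeInto p)) := by
  induction grid generalizing jobs with
  | nil => simp [pvProduct, pvMergeInto]
  | cons kv rest ih =>
    simp only [List.foldl_cons, ih]
    rw [List.flatMap_assoc]
    congr 1
    funext q
    simp only [pvProduct, List.map_cons, List.map_flatMap, List.flatMap_map, List.map_map]
    -- pointwise, pvMergeInto q ([(kv.1, v)] :: t) reduces definitionally to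
    -- pvMergeInto (pvDictIns q kv.1 v) t, so congr closes the goal
    congr 1

-- ===== VERDICT (by name: the statement is the Claim_ definition above) =====
theorem construct_jobs_spec : Claim_equal_construct_jobs := by
  intro grid _
  unfold Spec_construct_jobs construct_jobs construct_jobs_alt
  rw [construct_jobs_alt_invariant]
  simp [pvMergeInto]
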